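-- pv_equiv track=rewrite | github.com/enter-theusername/CV-toy-project | app.py | _expand_tabs_for_cv2
-- ===== SOURCE A (Python) =====
-- def _expand_tabs_for_cv2(text: str, tab_size: int = 4) -> str:
--         """
--         由于 cv2.putText 不支持 \t，这里把 Tab 展开为若干空格，使列对齐更可控。
--         采用“按字符列”计数的近似方案（与等宽字体一致），满足对齐诉求且实现简单稳健。
--         """
--         if not text:
--             return ""
--         out = []
--         col = 0
--         for ch in text:
--             if ch == '\t':
--                 spaces = tab_size - (col % tab_size)
--                 out.append(' ' * spaces)
--                 col += spaces
--             else: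
--                 out.append(ch)
--                 # \n / \r 视为换行，重置列计数
--                 if ch in ('\n', '\r'):
--                     col = 0
--                 else:
--                     col += 1
--         return ''.join(out)
-- ===== SOURCE B (Python) =====
-- def _expand_segment(seg, tab_size):
--     # seg contains no line breaks: expand tabs by jumping chunk-to-chunk.
--     chunks = seg.split('\t')
--     out = chunks[0]
--     col = len(chunks[0])
--     for chunk in chunks[1:]:
--         pad = tab_size - (col % tab_size)
--         out += ' ' * pad + chunk
--         col += pad + len(chunk)
--     return out
--
--
-- def _expand_tabs_for_cv2(text: str, tab_size: int = 4) -> str: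
--     # Partition the text on line breaks (which reset the column), expand each
--     # line-break-free segment independently, and rejoin.
--     pieces = []
--     seg = ''
--     for ch in text:
--         if ch == '\n' or ch == '\r':
--             pieces.append(_expand_segment(seg, tab_size))
--             pieces.append(ch)
--             seg = ''
--         else:
--             seg += ch
--     pieces.append(_expand_segment(seg, tab_size))
--     return ''.join(pieces)
-- ===== Notes on version B (the rewrite author's own statement) =====
-- stated objective: alternative
-- what changed: A is a single stateful per-character pass appending to one list; B partitions the text on line breaks, expands each break-free segment by splitting it on tabs and jumping chunk-to-chunk with column arithmetic only at each tab, then rejoins the pieces.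
import Mathlib
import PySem

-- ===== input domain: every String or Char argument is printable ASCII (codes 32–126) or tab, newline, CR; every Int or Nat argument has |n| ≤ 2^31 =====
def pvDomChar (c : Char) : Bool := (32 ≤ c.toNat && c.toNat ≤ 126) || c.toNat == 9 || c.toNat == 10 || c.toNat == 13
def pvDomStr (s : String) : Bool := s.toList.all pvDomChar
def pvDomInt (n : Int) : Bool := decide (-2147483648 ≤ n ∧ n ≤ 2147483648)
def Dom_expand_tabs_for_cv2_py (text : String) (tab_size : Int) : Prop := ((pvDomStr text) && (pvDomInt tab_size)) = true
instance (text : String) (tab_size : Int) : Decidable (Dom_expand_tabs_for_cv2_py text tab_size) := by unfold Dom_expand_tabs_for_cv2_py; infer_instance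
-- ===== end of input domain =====

-- B replaces A's single stateful per-character pass by a partition-process-rejoin
-- decomposition: split on line breaks, expand each segment by tab-chunks, rejoin
-- (objective: alternative, same asymptotic cost).


-- ===== PORT A =====
-- loop body of A's single pass: state = (out as list of string pieces, current column)
def pvAStep (tab_size : Int) (st : List (List Char) × Int) (ch : Char) : List (List Char) × Int :=
  if ch = '\t' then
    let spaces := tab_size - PySem.Int.mod st.2 tab_size
    (st.1 ++ [List.replicate spaces.toNat ' '], st.2 + spaces)  -- ' ' * spaces ('' if spaces ≤ 0)
  else
    (st.1 ++ [[ch]], if ch = '\n' ∨ ch = '\r' then (0 : Int) else st.2 + 1)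

def expand_tabs_for_cv2_py (text : String) (tab_size : Int) : String :=
  if text = "" then "" else
    String.ofList (PySem.Chars.join []
      (text.toList.foldl (pvAStep tab_size) ([], 0)).1)   -- ''.join(out)

-- ===== PORT B =====
-- B helper _expand_segment: split the break-free segment on '\t', jump chunk to chunk
def pvExpandSegment (seg : List Char) (tab_size : Int) : List Char :=
  match PySem.Chars.splitOn seg ['\t'] with       -- seg.split('\t'); never returns []
  | [] => []                                       -- unreachable (split is never empty)
  | c0 :: rest =>
    (rest.foldl (fun (st : List Char × Int) chunk =>
        let pad := tab_size - PySem.Int.mod st.2 tab_size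
        (st.1 ++ List.replicate pad.toNat ' ' ++ chunk, st.2 + pad + (chunk.length : Int)))
      (c0, (c0.length : Int))).1

-- loop body of B's partition pass: state = (pieces, pending break-free segment)
def pvBStep (tab_size : Int) (st : List (List Char) × List Char) (ch : Char) :
    List (List Char) × List Char :=
  if ch = '\n' ∨ ch = '\r' then
    (st.1 ++ [pvExpandSegment st.2 tab_size, [ch]], [])
  else
    (st.1, st.2 ++ [ch])

def expand_tabs_for_cv2_py_alt (text : String) (tab_size : Int) : String :=
  -- the final state (pieces, seg) of the partition loop, then ''.join(pieces + [expand(seg)])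
  String.ofList (PySem.Chars.join []
    ((text.toList.foldl (pvBStep tab_size) ([], [])).1
      ++ [pvExpandSegment (text.toList.foldl (pvBStep tab_size) ([], [])).2 tab_size]))

-- ===== PRECONDITION & SPEC =====
-- Pre_ excludes only inputs where Python A raises ZeroDivisionError (col % 0 at a tab).
def Pre_expand_tabs_for_cv2_py (text : String) (tab_size : Int) : Prop :=
  ¬(tab_size = 0 ∧ '\t' ∈ text.toList)
instance (text : String) (tab_size : Int) : Decidable (Pre_expand_tabs_for_cv2_py text tab_size) := by
  unfold Pre_expand_tabs_for_cv2_py; infer_instance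

def pvWitness_expand_tabs_for_cv2_py : String × Int := ("a\tb\nc\td", 4)

def Spec_expand_tabs_for_cv2_py (text : String) (tab_size : Int) (out : String) : Prop :=
  out = expand_tabs_for_cv2_py_alt text tab_size
instance (text : String) (tab_size : Int) (out : String) :
    Decidable (Spec_expand_tabs_for_cv2_py text tab_size out) := by
  unfold Spec_expand_tabs_for_cv2_py; infer_instance

-- ===== CLAIM (what is proved, stated in full; the proofs are below) =====
def Claim_equal_expand_tabs_for_cv2_py : Prop := ∀ (text : String) (tab_size : Int), Dom_expand_tabs_for_cv2_py text tab_size → Pre_expand_tabs_for_cv2_py text tab_size → Spec_expand_tabs_for_cv2_py text tab_size (expand_tabs_for_cv2_py text tab_size)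

-- ===== LEMMAS AND PROOFS =====

-- reference expansion: one recursive pass, the common meaning of both programs
def pvE (tab_size : Int) : List Char → Int → List Char
  | [], _ => []
  | c :: l, col =>
    if c = '\t' then
      List.replicate (tab_size - PySem.Int.mod col tab_size).toNat ' '
        ++ pvE tab_size l (col + (tab_size - PySem.Int.mod col tab_size))
    else c :: pvE tab_size l (if c = '\n' ∨ c = '\r' then 0 else col + 1)

def pvColAfter (tab_size : Int) : List Char → Int → Int
  | [], col => col
  | c :: l, col =>
    if c = '\t' then pvColAfter tab_size l (col + (tab_size - PySem.Int.mod col tab_size))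
    else pvColAfter tab_size l (if c = '\n' ∨ c = '\r' then 0 else col + 1)

-- structural splitter on '\t' (reference for PySem.Chars.splitOn)
def pvSplit : List Char → List Char → List (List Char)
  | pre, [] => [pre]
  | pre, c :: l => if c = '\t' then pre :: pvSplit [] l else pvSplit (pre ++ [c]) l

theorem pvJoin_nil_flatten (ps : List (List Char)) : PySem.Chars.join [] ps = ps.flatten := by
  induction ps with
  | nil => simp [PySem.Chars.join, List.intercalate]
  | cons p ps ih =>
    cases ps with
    | nil => simp [PySem.Chars.join, List.intercalate]
    | cons q ps' =>
      simp only [PySem.Chars.join, List.intercalate] at *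
      simp [List.intersperse] at *
      simpa using ih

theorem pvSplit_modifyHead (l : List Char) : ∀ pre : List Char,
    pvSplit pre l = (pvSplit [] l).modifyHead (pre ++ ·) := by
  induction l with
  | nil => intro pre; simp [pvSplit]
  | cons c l ih =>
    intro pre
    by_cases hc : c = '\t'
    · simp [pvSplit, hc]
    · simp only [pvSplit, if_neg hc, List.nil_append]
      rw [ih (pre ++ [c]), ih [c]]
      cases pvSplit [] l <;> simp

theorem pvSplit_ne_nil (pre l : List Char) : pvSplit pre l ≠ [] := by
  induction l generalizing pre with
  | nil => simp [pvSplit]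
  | cons c l ih =>
    by_cases hc : c = '\t' <;> simp [pvSplit, hc, ih]

theorem pvGo_spec (fuel : Nat) : ∀ (l cur : List Char) (acc : List (List Char)),
    l.length < fuel →
    PySem.Chars.splitOn.go ['\t'] fuel l cur acc = acc.reverse ++ pvSplit cur.reverse l := by
  induction fuel with
  | zero => intro l cur acc h; omega
  | succ fuel ih =>
    intro l cur acc h
    cases l with
    | nil =>
      rw [PySem.Chars.splitOn.go.eq_def]
      simp [pvSplit]
    | cons c rest =>
      rw [PySem.Chars.splitOn.go.eq_def]
      simp only []
      by_cases hc : c = '\t'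
      · subst hc
        have hpre : List.isPrefixOf ['\t'] ('\t' :: rest) = true := by
          simp [List.isPrefixOf]
        simp only [hpre, if_true]
        have hdrop : List.drop (['\t'] : List Char).length ('\t' :: rest) = rest := rfl
        rw [hdrop, ih rest [] _ (by simpa using Nat.lt_of_succ_lt_succ h)]
        simp [pvSplit]
      · have hpre : List.isPrefixOf ['\t'] (c :: rest) = false := by
          simp [List.isPrefixOf]; exact fun h' => absurd h'.symm hc
        simp only [hpre, Bool.false_eq_true, if_false]
        rw [ih rest (c :: cur) acc (by simpa using Nat.lt_of_succ_lt_succ h)]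
        simp [pvSplit, hc]

theorem pvSplitOn_tab (l : List Char) : PySem.Chars.splitOn l ['\t'] = pvSplit [] l := by
  unfold PySem.Chars.splitOn
  rw [pvGo_spec (l.length + 1) l [] [] (by omega)]
  simp

theorem pvE_append (tab_size : Int) (xs : List Char) : ∀ (ys : List Char) (col : Int),
    pvE tab_size (xs ++ ys) col
      = pvE tab_size xs col ++ pvE tab_size ys (pvColAfter tab_size xs col) := by
  induction xs with
  | nil => intro ys col; simp [pvE, pvColAfter]
  | cons c xs ih =>
    intro ys col
    by_cases hc : c = '\t'
    · simp [pvE, pvColAfter, hc, ih]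
    · by_cases hn : c = '\n' ∨ c = '\r' <;> simp [pvE, pvColAfter, hc, hn, ih]

-- A's fold computes pvE
theorem pvA_fold (tab_size : Int) (l : List Char) : ∀ (out : List (List Char)) (col : Int),
    (l.foldl (pvAStep tab_size) (out, col)).1.flatten = out.flatten ++ pvE tab_size l col := by
  induction l with
  | nil => intro out col; simp [pvE]
  | cons c l ih =>
    intro out col
    by_cases hc : c = '\t'
    · simp only [List.foldl_cons, pvAStep, if_pos hc, pvE, hc]
      rw [ih]
      simp
    · by_cases hn : c = '\n' ∨ c = '\r' <;>
        · simp only [List.foldl_cons, pvAStep, if_neg hc, pvE, hc, hn]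
          rw [ih]
          simp [hn]

-- B's inner chunk fold computes pvE on a break-free segment
theorem pvSeg_fold (tab_size : Int) (l : List Char) :
    ∀ (hd : List Char) (tl : List (List Char)) (acc : List Char) (col : Int),
    (∀ c ∈ l, ¬(c = '\n' ∨ c = '\r')) →
    pvSplit [] l = hd :: tl →
    ((tl.foldl (fun (st : List Char × Int) chunk =>
        let pad := tab_size - PySem.Int.mod st.2 tab_size
        (st.1 ++ List.replicate pad.toNat ' ' ++ chunk, st.2 + pad + (chunk.length : Int)))
      (acc ++ hd, col + (hd.length : Int)))).1 = acc ++ pvE tab_size l col := by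
  induction l with
  | nil =>
    intro hd tl acc col _ hsplit
    simp [pvSplit] at hsplit
    obtain ⟨h1, h2⟩ := hsplit
    subst h1; subst h2
    simp [pvE]
  | cons c l ih =>
    intro hd tl acc col hnl hsplit
    have hnl' : ∀ c' ∈ l, ¬(c' = '\n' ∨ c' = '\r') := fun c' hc' => hnl c' (by simp [hc'])
    by_cases hc : c = '\t'
    · subst hc
      simp only [pvSplit, if_pos rfl] at hsplit
      cases hsl : pvSplit [] l with
      | nil => exact absurd hsl (pvSplit_ne_nil [] l)
      | cons hd' tl' =>
        rw [hsl] at hsplit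
        injection hsplit with e1 e2
        subst e1; subst e2
        have e0 : acc ++ ([] : List Char) = acc := by simp
        have e1 : col + ((([] : List Char).length : Nat) : Int) = col := by simp
        rw [e0, e1, List.foldl_cons]
        rw [ih hd' tl' (acc ++ List.replicate (tab_size - PySem.Int.mod col tab_size).toNat ' ')
              (col + (tab_size - PySem.Int.mod col tab_size)) hnl' hsl]
        simp [pvE]
    · simp only [pvSplit, if_neg hc, List.nil_append] at hsplit
      rw [pvSplit_modifyHead l [c]] at hsplit
      cases hsl : pvSplit [] l with
      | nil => exact absurd hsl (pvSplit_ne_nil [] l)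
      | cons hd' tl' =>
        rw [hsl] at hsplit
        simp only [List.modifyHead] at hsplit
        injection hsplit with e1 e2
        subst e1; subst e2
        have hn : ¬(c = '\n' ∨ c = '\r') := hnl c (by simp)
        have e0 : acc ++ (([c] ++ hd' : List Char)) = (acc ++ [c]) ++ hd' := by simp
        have e1 : col + ((([c] ++ hd' : List Char).length : Nat) : Int)
            = (col + 1) + ((hd'.length : Nat) : Int) := by
          simp only [List.length_append, List.length_cons, List.length_nil]
          push_cast; ring
        rw [e0, e1, ih hd' tl' (acc ++ [c]) (col + 1) hnl' hsl]
        simp [pvE, hc, hn]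

theorem pvExpandSegment_eq (tab_size : Int) (seg : List Char)
    (hnl : ∀ c ∈ seg, ¬(c = '\n' ∨ c = '\r')) :
    pvExpandSegment seg tab_size = pvE tab_size seg 0 := by
  unfold pvExpandSegment
  rw [pvSplitOn_tab]
  obtain h : pvSplit [] seg ≠ [] := pvSplit_ne_nil [] seg
  cases hsl : pvSplit [] seg with
  | nil => exact absurd hsl h
  | cons hd tl =>
    have := pvSeg_fold tab_size seg hd tl [] 0 hnl hsl
    simpa using this

-- B's outer fold computes pvE of the whole text
theorem pvB_fold (tab_size : Int) (l : List Char) :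
    ∀ (pieces : List (List Char)) (seg : List Char),
    (∀ c ∈ seg, ¬(c = '\n' ∨ c = '\r')) →
    (((l.foldl (pvBStep tab_size) (pieces, seg)).1
        ++ [pvExpandSegment ((l.foldl (pvBStep tab_size) (pieces, seg)).2) tab_size]).flatten)
      = pieces.flatten ++ pvE tab_size (seg ++ l) 0 := by
  induction l with
  | nil =>
    intro pieces seg hnl
    simp [pvExpandSegment_eq tab_size seg hnl]
  | cons c l ih =>
    intro pieces seg hnl
    by_cases hn : c = '\n' ∨ c = '\r'
    · simp only [List.foldl_cons, pvBStep, if_pos hn]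
      rw [ih (pieces ++ [pvExpandSegment seg tab_size, [c]]) [] (by simp)]
      rw [pvE_append tab_size seg (c :: l) 0]
      have hct : c ≠ '\t' := by rcases hn with h | h <;> simp [h]
      simp only [pvE, if_neg hct, if_pos hn]
      simp [pvExpandSegment_eq tab_size seg hnl, List.nil_append]
    · simp only [List.foldl_cons, pvBStep, if_neg hn]
      rw [ih pieces (seg ++ [c]) (by intro c' hc'; rcases List.mem_append.1 hc' with h | h
                                     · exact hnl c' h
                                     · simp at h; subst h; exact hn)]
      simp

theorem pvAlt_eq_pvE (text : String) (tab_size : Int) :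
    expand_tabs_for_cv2_py_alt text tab_size = String.ofList (pvE tab_size text.toList 0) := by
  unfold expand_tabs_for_cv2_py_alt
  rw [pvJoin_nil_flatten]
  rw [pvB_fold tab_size text.toList [] [] (by simp)]
  simp

-- ===== VERDICT (by name: the statement is the Claim_ definition above) =====
theorem expand_tabs_for_cv2_py_spec : Claim_equal_expand_tabs_for_cv2_py := by
  intro text tab_size _ _
  unfold Spec_expand_tabs_for_cv2_py
  rw [pvAlt_eq_pvE]
  unfold expand_tabs_for_cv2_py
  by_cases htext : text = ""
  · subst htext
    simp [pvE]
  · simp only [if_neg htext]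
    rw [pvJoin_nil_flatten]
    rw [pvA_fold tab_size text.toList [] 0]
    simp
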